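-- pv_equiv track=rewrite | github.com/jossu10/LeetcodeTraining | Dynamic_Programming.py | greatest_i
-- ===== SOURCE A (Python) =====
-- def greatest_i(start,finish,n):
-- 	p=[]
-- 	for i in range(n,-1,-1):
-- 		for j in range(i-1,-1,-1):
-- 			if start[i]>=start[j] and finish[j]<=start[i]:
-- 				p.append(j+1)
-- 				break
-- 			if j==0:
-- 				p.append(0)
-- 				break
-- 	p.append(0)
-- 	p=p[::-1]
-- 	return p
-- ===== SOURCE B (Python) =====
-- def greatest_i(start, finish, n):
--     out = [0]
--     stk = []  # (key, index) pairs; keys strictly increasing bottom to top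
--     for i in range(1, n + 1):
--         k = max(start[i - 1], finish[i - 1])
--         while stk and stk[-1][0] >= k:
--             stk.pop()
--         stk.append((k, i - 1))
--         s = start[i]
--         lo, hi = 0, len(stk)
--         while lo < hi:  # rightmost position with key <= s (hand-rolled bisect_right)
--             mid = (lo + hi) // 2
--             if stk[mid][0] <= s:
--                 lo = mid + 1
--             else:
--                 hi = mid
--         out.append(stk[lo - 1][1] + 1 if lo > 0 else 0)
--     return out
-- ===== Notes on version B (the rewrite author's own statement) =====
-- stated objective: faster
-- what changed: A answers each position by a backward scan over all earlier intervals (built in reverse and reversed at the end); B does one forward sweep maintaining a monotone stack of undominated (max(start,finish), index) pairs and answers each position by a hand-rolled binary search on the stack, turning the worst-case quadratic scan into O(n log n).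
-- outside the precondition, e.g. on greatest_i([5, 3], [], 1): A returns [0, 0], B raises IndexError
import Mathlib
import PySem

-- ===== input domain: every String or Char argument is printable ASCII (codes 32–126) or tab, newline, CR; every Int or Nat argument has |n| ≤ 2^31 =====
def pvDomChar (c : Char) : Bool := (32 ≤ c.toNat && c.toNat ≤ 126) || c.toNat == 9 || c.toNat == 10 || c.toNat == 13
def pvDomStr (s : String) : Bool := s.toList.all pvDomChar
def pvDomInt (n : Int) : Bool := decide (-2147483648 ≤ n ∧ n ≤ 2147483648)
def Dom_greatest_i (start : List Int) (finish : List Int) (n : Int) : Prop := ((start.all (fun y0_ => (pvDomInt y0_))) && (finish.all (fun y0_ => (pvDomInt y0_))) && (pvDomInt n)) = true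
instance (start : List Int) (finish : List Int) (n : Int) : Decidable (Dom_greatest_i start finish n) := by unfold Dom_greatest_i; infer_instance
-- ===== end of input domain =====

-- B replaces A's quadratic backward scans (built in reverse and finally reversed) by a single
-- forward sweep keeping a monotone stack of candidate (key, index) pairs, answering each query
-- by a hand-rolled binary search on the stack (objective: faster, measured).

-- ===== PORT A =====
-- inner loop 'for j in range(i-1,-1,-1): …' of A; returns the value appended (none = nothing appended)
def pvInnerA (start : List Int) (finish : List Int) (i : Int) : List Int → Option Int
  | [] => none
  | j :: rest =>
    if PySem.List.pyGetD start i 0 ≥ PySem.List.pyGetD start j 0 ∧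
       PySem.List.pyGetD finish j 0 ≤ PySem.List.pyGetD start i 0 then some (j + 1)
    else if j = 0 then some 0
    else pvInnerA start finish i rest

def greatest_i (start : List Int) (finish : List Int) (n : Int) : List Int :=
  let p : List Int :=
    (PySem.List.pyRange n (-1) (-1)).foldl (fun p i =>
      match pvInnerA start finish i (PySem.List.pyRange (i - 1) (-1) (-1)) with
      | some v => p ++ [v]
      | none => p) []
  let p := p ++ [0]
  (PySem.List.slice? p none none (-1)).getD []   -- p[::-1]; step -1 never raises

-- ===== PORT B =====
-- 'while stk and stk[-1][0] >= k: stk.pop()'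
def pvPop (k : Int) (stk : List (Int × Int)) : List (Int × Int) :=
  match h : stk.getLast? with
  | some e => if e.1 ≥ k then pvPop k stk.dropLast else stk
  | none => stk
termination_by stk.length
decreasing_by
  have hne : stk ≠ [] := by intro hnil; rw [hnil] at h; simp at h
  have := List.length_pos_iff.mpr hne
  simp [List.length_dropLast]; omega

-- 'while lo < hi: mid = (lo + hi) // 2; …'  (hand-rolled bisect_right on the stack keys)
def pvBisect (stk : List (Int × Int)) (s lo hi : Int) : Int :=
  if lo < hi then
    let mid := PySem.Int.floordiv (lo + hi) 2
    if (PySem.List.pyGetD stk mid (0, 0)).1 ≤ s then pvBisect stk s (mid + 1) hi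
    else pvBisect stk s lo mid
  else lo
termination_by (hi - lo).toNat
decreasing_by
  · have h1 := PySem.Int.floordiv_two_mid_bounds (by omega : lo ≤ hi)
    omega
  · have h1 := PySem.Int.floordiv_two_mid_bounds (by omega : lo ≤ hi)
    have h2 : PySem.Int.floordiv (lo + hi) 2 < hi :=
      (PySem.Int.floordiv_lt_iff_lt_mul (by omega)).mpr (by omega)
    omega

def greatest_i_alt (start : List Int) (finish : List Int) (n : Int) : List Int :=
  ((PySem.List.pyRange 1 (n + 1) 1).foldl (fun st i =>
      let k := max (PySem.List.pyGetD start (i - 1) 0) (PySem.List.pyGetD finish (i - 1) 0)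
      let stk := pvPop k st.2
      let stk := stk ++ [(k, i - 1)]
      let s := PySem.List.pyGetD start i 0
      let lo := pvBisect stk s 0 (PySem.List.len stk)
      (st.1 ++ [if 0 < lo then (PySem.List.pyGetD stk (lo - 1) (0, 0)).2 + 1 else 0], stk))
    (([0] : List Int), ([] : List (Int × Int)))).1

-- ===== PRECONDITION & SPEC =====
-- Pre_ excludes inputs whose lists are too short for the n+1 starts and n finishes the scan may
-- touch: there A raises IndexError, except for accidental returns where the and-short-circuit
-- skips the missing finish[j]; B always evaluates finish[j] and raises on those.
def Pre_greatest_i (start : List Int) (finish : List Int) (n : Int) : Prop :=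
  n ≤ 0 ∨ (n < (start.length : Int) ∧ n ≤ (finish.length : Int))
instance (start : List Int) (finish : List Int) (n : Int) : Decidable (Pre_greatest_i start finish n) := by unfold Pre_greatest_i; infer_instance

def pvWitness_greatest_i : List Int × List Int × Int := ([1, 2], [1, 2], 1)

def Spec_greatest_i (start : List Int) (finish : List Int) (n : Int) (out : List Int) : Prop := out = greatest_i_alt start finish n
instance (start : List Int) (finish : List Int) (n : Int) (out : List Int) : Decidable (Spec_greatest_i start finish n out) := by unfold Spec_greatest_i; infer_instance

-- ===== CLAIM (what is proved, stated in full; the proofs are below) =====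
def Claim_equal_greatest_i : Prop := ∀ (start : List Int) (finish : List Int) (n : Int), Dom_greatest_i start finish n → Pre_greatest_i start finish n → Spec_greatest_i start finish n (greatest_i start finish n)

-- ===== LEMMAS AND PROOFS =====

-- the compatibility key of interval j, and the value both programs compute for position i:
-- the last j < i with key j ≤ s (+1), else 0
def pvKey (start finish : List Int) (j : Int) : Int :=
  max (PySem.List.pyGetD start j 0) (PySem.List.pyGetD finish j 0)

def pvNaive (start finish : List Int) (m : Nat) (s : Int) : Int :=
  (PySem.List.pyRange 0 (m : Int) 1).foldl
    (fun best j => if pvKey start finish j ≤ s then j + 1 else best) 0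

def pvBest (start finish : List Int) (i : Int) : Int :=
  (PySem.List.pyRange 0 i 1).foldl (fun best j =>
    if max (PySem.List.pyGetD start j 0) (PySem.List.pyGetD finish j 0) ≤ PySem.List.pyGetD start i 0
    then j + 1 else best) 0

-- ============ A-side: A returns [0] ++ [pvBest 1, …, pvBest n] ============

-- backward first-match scan = forward last-match fold
lemma pvInner_eq (start finish : List Int) (i : Int) (k : Nat) :
    pvInnerA start finish i (PySem.List.pyRange (k : Int) (-1) (-1)) =
      some ((PySem.List.pyRange 0 ((k : Int) + 1) 1).foldl (fun best j =>
        if max (PySem.List.pyGetD start j 0) (PySem.List.pyGetD finish j 0) ≤ PySem.List.pyGetD start i 0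
        then j + 1 else best) 0) := by
  induction k with
  | zero =>
      simp only [Nat.cast_zero]
      rw [PySem.List.pyRange_neg_one_cons (by omega), PySem.List.pyRange_neg_one_eq_nil (by omega)]
      rw [PySem.List.pyRange_one_singleton]
      simp only [pvInnerA, List.foldl]
      by_cases h : max (PySem.List.pyGetD start 0 0) (PySem.List.pyGetD finish 0 0) ≤ PySem.List.pyGetD start i 0
      · rw [if_pos (by constructor <;> omega), if_pos h]
      · simp [h]; omega
  | succ k ih =>
      rw [show ((k + 1 : Nat) : Int) = (k : Int) + 1 by push_cast; ring]
      rw [PySem.List.pyRange_neg_one_cons (by omega)]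
      rw [show (k : Int) + 1 - 1 = (k : Int) by ring]
      rw [PySem.List.pyRange_one_succ_right (by omega), List.foldl_append]
      simp only [pvInnerA, List.foldl]
      by_cases h : max (PySem.List.pyGetD start ((k : Int) + 1) 0) (PySem.List.pyGetD finish ((k : Int) + 1) 0) ≤ PySem.List.pyGetD start i 0
      · rw [if_pos (by constructor <;> omega), if_pos h]
      · rw [if_neg (by omega), if_neg (by omega), ih, if_neg h]

-- A's outer loop over range(m, -1, -1) appends exactly [pvBest m, …, pvBest 1]
lemma pvOuter_eq (start finish : List Int) (m : Nat) (acc : List Int) :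
    (PySem.List.pyRange (m : Int) (-1) (-1)).foldl (fun p i =>
      match pvInnerA start finish i (PySem.List.pyRange (i - 1) (-1) (-1)) with
      | some v => p ++ [v]
      | none => p) acc
    = acc ++ ((List.range m).map (fun (k : Nat) => pvBest start finish ((k : Int) + 1))).reverse := by
  induction m generalizing acc with
  | zero =>
      rw [PySem.List.pyRange_neg_one_cons (by omega), PySem.List.pyRange_neg_one_eq_nil (by omega)]
      simp [PySem.List.pyRange_neg_one_eq_nil, pvInnerA]
  | succ m ih =>
      rw [show ((m + 1 : Nat) : Int) = (m : Int) + 1 by push_cast; ring]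
      rw [PySem.List.pyRange_neg_one_cons (by omega)]
      simp only [List.foldl]
      rw [show (m : Int) + 1 - 1 = (m : Int) by ring, pvInner_eq]
      rw [ih]
      rw [List.range_succ]
      simp [pvBest, List.append_assoc]

-- ============ B-side ghost state ============

def pvStk (start finish : List Int) : Nat → List (Int × Int)
  | 0 => []
  | m + 1 => pvPop (pvKey start finish (m : Int)) (pvStk start finish m)
             ++ [(pvKey start finish (m : Int), (m : Int))]

def pvQuery (stk : List (Int × Int)) (s : Int) : Int :=
  let lo := pvBisect stk s 0 (PySem.List.len stk)
  if 0 < lo then (PySem.List.pyGetD stk (lo - 1) (0, 0)).2 + 1 else 0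

-- first entry from the top of the stack whose key ≤ s (reference answer)
def pvAnsR : List (Int × Int) → Int → Int
  | [], _ => 0
  | e :: r, s => if e.1 ≤ s then e.2 + 1 else pvAnsR r s

-- B's fold in terms of the ghost state
lemma pvFold_eq (start finish : List Int) (m : Nat) :
    (PySem.List.pyRange 1 ((m : Int) + 1) 1).foldl (fun st i =>
      let k := max (PySem.List.pyGetD start (i - 1) 0) (PySem.List.pyGetD finish (i - 1) 0)
      let stk := pvPop k st.2
      let stk := stk ++ [(k, i - 1)]
      let s := PySem.List.pyGetD start i 0
      let lo := pvBisect stk s 0 (PySem.List.len stk)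
      (st.1 ++ [if 0 < lo then (PySem.List.pyGetD stk (lo - 1) (0, 0)).2 + 1 else 0], stk))
      (([0] : List Int), ([] : List (Int × Int)))
    = (0 :: (List.range m).map (fun (q : Nat) =>
          pvQuery (pvStk start finish (q + 1)) (PySem.List.pyGetD start ((q : Int) + 1) 0)),
       pvStk start finish m) := by
  induction m with
  | zero => rw [show ((0 : Nat) : Int) + 1 = 1 by norm_num, PySem.List.pyRange_one_eq_nil (by omega)]
            simp [pvStk]
  | succ m ih =>
      rw [show ((m + 1 : Nat) : Int) + 1 = ((m : Int) + 1) + 1 by push_cast; ring]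
      rw [PySem.List.pyRange_one_succ_right (by omega), List.foldl_append, ih]
      simp only [List.foldl]
      rw [show (m : Int) + 1 - 1 = (m : Int) by ring, Prod.mk.injEq]
      refine ⟨?_, ?_⟩
      · rw [List.range_succ]
        simp [pvQuery, pvStk, pvKey]
      · simp [pvStk, pvKey]

-- dropping popped entries (key ≥ k > s) does not change the reference answer
lemma pvAnsR_dropWhile (r : List (Int × Int)) (k s : Int) (h : s < k) :
    pvAnsR (r.dropWhile (fun e => decide (e.1 ≥ k))) s = pvAnsR r s := by
  induction r with
  | nil => rfl
  | cons e r ih =>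
      by_cases he : e.1 ≥ k
      · rw [List.dropWhile_cons_of_pos (by simpa using he), ih]
        simp only [pvAnsR]
        rw [if_neg (by omega)]
      · rw [List.dropWhile_cons_of_neg (by simpa using he)]

-- pvPop in terms of dropWhile on the reversed stack
lemma pvPop_reverse (k : Int) (stk : List (Int × Int)) :
    (pvPop k stk).reverse = stk.reverse.dropWhile (fun e => decide (e.1 ≥ k)) := by
  induction hl : stk.length using Nat.strong_induction_on generalizing stk with
  | _ l ihl =>
    rw [pvPop]
    split
    next e h =>
        have hne : stk ≠ [] := by intro hnil; rw [hnil] at h; simp at h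
        have hdec : stk = stk.dropLast ++ [e] := by
          conv_lhs => rw [← List.dropLast_concat_getLast hne]
          rw [List.getLast?_eq_some_getLast hne] at h
          simp at h; rw [h]
        by_cases hk : e.1 ≥ k
        · rw [if_pos hk]
          rw [ihl (stk.dropLast.length) (by subst hl; have := List.length_pos_iff.mpr hne; simp [List.length_dropLast]; omega) _ rfl]
          conv_rhs => rw [hdec]
          rw [List.reverse_append]
          simp [List.dropWhile_cons_of_pos, hk]
        · rw [if_neg hk]
          conv_rhs => rw [hdec]
          rw [List.reverse_append]
          simp [List.dropWhile_cons_of_neg, hk]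
          exact hdec
    next h =>
        rw [List.getLast?_eq_none_iff.mp h]; rfl

-- the stack answers every query like the naive forward fold
lemma pvStk_ans (start finish : List Int) (m : Nat) (s : Int) :
    pvAnsR (pvStk start finish m).reverse s = pvNaive start finish m s := by
  induction m with
  | zero => simp [pvStk, pvNaive, PySem.List.pyRange_one_eq_nil, pvAnsR]
  | succ m ih =>
      have hnaive : pvNaive start finish (m + 1) s
          = if pvKey start finish (m : Int) ≤ s then (m : Int) + 1 else pvNaive start finish m s := by
        unfold pvNaive
        rw [show ((m + 1 : Nat) : Int) = (m : Int) + 1 by push_cast; ring]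
        rw [PySem.List.pyRange_one_succ_right (by omega), List.foldl_append]
        simp
      rw [hnaive]
      simp only [pvStk, List.reverse_append, List.reverse_cons, List.reverse_nil, List.nil_append,
        List.singleton_append]
      simp only [pvAnsR]
      by_cases hk : pvKey start finish (m : Int) ≤ s
      · rw [if_pos hk, if_pos hk]
      · rw [if_neg hk, if_neg hk, pvPop_reverse, pvAnsR_dropWhile _ _ _ (by omega), ih]

-- every entry surviving the pop has key < k  (uses sortedness of the stack)
lemma pvDropWhile_keys_lt (r : List (Int × Int)) (k : Int)
    (hs : r.Pairwise (fun a b => b.1 < a.1)) :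
    ∀ e ∈ r.dropWhile (fun e => decide (e.1 ≥ k)), e.1 < k := by
  induction r with
  | nil => intro e he; simp at he
  | cons x t ih =>
      by_cases hx : x.1 ≥ k
      · rw [List.dropWhile_cons_of_pos (by simpa using hx)]
        exact ih (List.Pairwise.of_cons hs)
      · rw [List.dropWhile_cons_of_neg (by simpa using hx)]
        intro e he
        rcases List.mem_cons.mp he with rfl | he
        · omega
        · have := (List.pairwise_cons.mp hs).1 e he
          omega

-- the reversed stack is strictly decreasing in keys
lemma pvStk_sorted (start finish : List Int) (m : Nat) :
    (pvStk start finish m).reverse.Pairwise (fun a b => b.1 < a.1) := by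
  induction m with
  | zero => simp [pvStk]
  | succ m ih =>
      simp only [pvStk, List.reverse_append, List.reverse_cons, List.reverse_nil, List.nil_append,
        List.singleton_append]
      rw [pvPop_reverse]
      refine List.pairwise_cons.mpr ⟨?_, ?_⟩
      · intro e he
        exact pvDropWhile_keys_lt _ _ ih e he
      · exact List.Pairwise.sublist (List.dropWhile_sublist _) ih

-- keys along the stack (bottom → top) are monotone
lemma pvStk_mono (stk : List (Int × Int)) (hs : stk.reverse.Pairwise (fun a b => b.1 < a.1))
    {p q : Nat} (hpq : p ≤ q) (hq : q < stk.length) :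
    (stk[p]'(by omega)).1 ≤ (stk[q]'hq).1 := by
  rcases Nat.eq_or_lt_of_le hpq with rfl | hlt
  · omega
  · have hs' : stk.Pairwise (fun a b => a.1 < b.1) := by
      have := (List.pairwise_reverse).mp hs
      simpa using this
    have := List.pairwise_iff_getElem.mp hs' p q (by omega) hq hlt
    omega

-- binary-search correctness: pvBisect returns the count of keys ≤ s
lemma pvBisect_correct (stk : List (Int × Int)) (s : Int)
    (hs : stk.reverse.Pairwise (fun a b => b.1 < a.1)) :
    ∀ (lo hi : Int), 0 ≤ lo → lo ≤ hi → hi ≤ (stk.length : Int) →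
    (∀ p : Nat, (hp : p < stk.length) → (p : Int) < lo → (stk[p]'hp).1 ≤ s) →
    (∀ p : Nat, (hp : p < stk.length) → hi ≤ (p : Int) → s < (stk[p]'hp).1) →
    (0 ≤ pvBisect stk s lo hi ∧ pvBisect stk s lo hi ≤ (stk.length : Int) ∧
     (∀ p : Nat, (hp : p < stk.length) → (p : Int) < pvBisect stk s lo hi → (stk[p]'hp).1 ≤ s) ∧
     (∀ p : Nat, (hp : p < stk.length) → pvBisect stk s lo hi ≤ (p : Int) → s < (stk[p]'hp).1)) := by
  intro lo hi
  induction hfuel : (hi - lo).toNat using Nat.strong_induction_on generalizing lo hi with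
  | _ fuel ih =>
    intro h0 hlh hh hlo hhi
    rw [pvBisect]
    by_cases hlt : lo < hi
    · rw [if_pos hlt]
      have hmid := PySem.Int.floordiv_two_mid_bounds (by omega : lo ≤ hi)
      have hmidhi : PySem.Int.floordiv (lo + hi) 2 < hi :=
        (PySem.Int.floordiv_lt_iff_lt_mul (by omega)).mpr (by omega)
      set mid := PySem.Int.floordiv (lo + hi) 2 with hmiddef
      have hmlen : mid.toNat < stk.length := by omega
      have hget : PySem.List.pyGetD stk mid (0, 0) = stk[mid.toNat]'hmlen :=
        PySem.List.pyGetD_eq_getElem stk ((0, 0) : Int × Int) (by omega) (by omega)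
      by_cases hc : (PySem.List.pyGetD stk mid (0, 0)).1 ≤ s
      · rw [if_pos hc]
        refine ih ((hi - (mid + 1)).toNat) (by omega) (mid + 1) hi rfl (by omega) (by omega) hh
          ?_ hhi
        intro p hp hplt
        calc (stk[p]'hp).1 ≤ (stk[mid.toNat]'hmlen).1 := pvStk_mono stk hs (by omega) hmlen
          _ ≤ s := by rw [← hget]; exact hc
      · rw [if_neg hc]
        refine ih ((mid - lo).toNat) (by omega) lo mid rfl (by omega) (by omega) (by omega)
          hlo ?_
        intro p hp hple
        have : s < (stk[mid.toNat]'hmlen).1 := by rw [← hget]; omega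
        have := pvStk_mono stk hs (show mid.toNat ≤ p by omega) hp
        omega
    · rw [if_neg hlt]
      have hle : hi = lo := by omega
      exact ⟨h0, by omega, fun p hp h => hlo p hp h, fun p hp h => hhi p hp (by omega)⟩

-- skipping entries that fail the key test
lemma pvAnsR_append_skip (xs ys : List (Int × Int)) (s : Int)
    (h : ∀ e ∈ xs, ¬ e.1 ≤ s) :
    pvAnsR (xs ++ ys) s = pvAnsR ys s := by
  induction xs with
  | nil => rfl
  | cons e t ih =>
      simp only [List.cons_append, pvAnsR]
      rw [if_neg (h e (by simp)), ih (fun e he => h e (by simp [he]))]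

lemma pvAnsR_all_fail (r : List (Int × Int)) (s : Int) (h : ∀ e ∈ r, ¬ e.1 ≤ s) :
    pvAnsR r s = 0 := by
  have := pvAnsR_append_skip r [] s h
  simpa using this

-- the binary-search query equals the reference answer on a sorted stack
lemma pvQuery_eq_ansR (stk : List (Int × Int)) (s : Int)
    (hs : stk.reverse.Pairwise (fun a b => b.1 < a.1)) :
    pvQuery stk s = pvAnsR stk.reverse s := by
  unfold pvQuery
  simp only [PySem.List.len_eq]
  obtain ⟨hL0, hLlen, hLle, hLgt⟩ := pvBisect_correct stk s hs 0 (stk.length : Int)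
    (by omega) (by omega) (by omega) (by intro p hp h; omega) (by intro p hp h; omega)
  set L := pvBisect stk s 0 ((stk.length : Int)) with hLdef
  by_cases hpos : 0 < L
  · rw [if_pos hpos]
    set L' := L.toNat with hL'
    have hL'len : L' ≤ stk.length := by omega
    have hL'pos : 0 < L' := by omega
    have hgetlast : PySem.List.pyGetD stk (L - 1) (0, 0) = stk[L' - 1]'(by omega) := by
      have := PySem.List.pyGetD_eq_getElem stk (((0 : Int), (0 : Int)))
        (show (0 : Int) ≤ L - 1 by omega) (show L - 1 < (stk.length : Int) by omega)
      rw [this]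
      congr 1
      omega
    have hdecomp : stk = stk.take (L' - 1) ++ stk[L' - 1]'(by omega) :: stk.drop L' := by
      conv_lhs => rw [← List.take_append_drop (L' - 1) stk]
      congr 1
      rw [List.drop_eq_getElem_cons (by omega)]
      congr 2
      omega
    conv_rhs => rw [hdecomp]
    rw [List.reverse_append, List.reverse_cons, List.append_assoc]
    rw [pvAnsR_append_skip]
    · simp only [List.singleton_append, pvAnsR]
      rw [if_pos (hLle (L' - 1) (by omega) (by omega)), hgetlast]
    · intro e he
      rw [List.mem_reverse] at he
      obtain ⟨q, hq, rfl⟩ := List.mem_iff_getElem.mp he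
      rw [List.getElem_drop]
      have := hLgt (L' + q) (by simp at hq; omega) (by omega)
      omega
  · rw [if_neg hpos]
    rw [pvAnsR_all_fail]
    intro e he
    rw [List.mem_reverse] at he
    obtain ⟨q, hq, rfl⟩ := List.mem_iff_getElem.mp he
    have := hLgt q hq (by omega)
    omega

-- chain: B's per-position value = pvBest
lemma pvQuery_eq_best (start finish : List Int) (q : Nat) :
    pvQuery (pvStk start finish (q + 1)) (PySem.List.pyGetD start ((q : Int) + 1) 0)
      = pvBest start finish ((q : Int) + 1) := by
  rw [pvQuery_eq_ansR _ _ (pvStk_sorted start finish (q + 1)), pvStk_ans]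
  unfold pvNaive pvBest pvKey
  rw [show ((q + 1 : Nat) : Int) = (q : Int) + 1 by push_cast; ring]

-- B returns [0] ++ [pvBest 1, …, pvBest m]
lemma pvAlt_eq (start finish : List Int) (m : Nat) :
    greatest_i_alt start finish (m : Int)
      = 0 :: (List.range m).map (fun (k : Nat) => pvBest start finish ((k : Int) + 1)) := by
  unfold greatest_i_alt
  rw [pvFold_eq]
  simp only [List.cons.injEq, true_and]
  exact List.map_congr_left (fun k _ => pvQuery_eq_best start finish k)

-- ===== VERDICT (by name: the statement is the Claim_ definition above) =====
theorem greatest_i_spec : Claim_equal_greatest_i := by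
  intro start finish n _ _
  unfold Spec_greatest_i greatest_i
  simp only [PySem.List.slice?_none_none_neg_one, Option.getD_some]
  rcases le_or_gt n 0 with hn | hn
  · rcases lt_or_eq_of_le hn with hlt | rfl
    · rw [PySem.List.pyRange_neg_one_eq_nil (by omega)]
      unfold greatest_i_alt
      rw [PySem.List.pyRange_one_eq_nil (by omega)]
      simp
    · rw [show (0 : Int) = ((0 : Nat) : Int) by norm_num, pvOuter_eq, pvAlt_eq]
      simp
  · obtain ⟨m, rfl⟩ : ∃ m : Nat, n = (m : Int) := ⟨n.toNat, by omega⟩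
    rw [pvOuter_eq, pvAlt_eq]
    simp
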